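-- pv_equiv track=rewrite | github.com/MED-SENTINEL/BACKEND | app/services/insight_service.py | _extract_key_findings
-- ===== SOURCE A (Python) =====
-- from typing import Dict, List, Any
--
-- def _extract_key_findings(all_values: Dict, all_flags: List[str]) -> List[Dict]:
--     """Extract key findings from lab values."""
--     findings = []
--
--     for test_name, data in all_values.items():
--         status = data.get("status", "normal")
--         if status == "normal":
--             continue
--
--         display = test_name.replace("_", " ").title()
--         severity = "critical" if status == "critical" else "warning" if status in ["elevated", "low"] else "info"
--
--         findings.append({
--             "finding": f"{display}: {data.get('value')} {data.get('unit', '')}",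
--             "severity": severity,
--             "detail": f"Reference range: {data.get('reference_range', '?')} — Status: {status}"
--         })
--
--     # Sort by severity
--     order = {"critical": 0, "warning": 1, "info": 2}
--     findings.sort(key=lambda f: order.get(f["severity"], 3))
--
--     return findings[:10]
-- ===== SOURCE B (Python) =====
-- def _finding(test_name, data, status, severity):
--     display = test_name.replace("_", " ").title()
--     return {
--         "finding": f"{display}: {data.get('value')} {data.get('unit', '')}",
--         "severity": severity,
--         "detail": f"Reference range: {data.get('reference_range', '?')} — Status: {status}"
--     }
--
--
-- def _extract_key_findings(all_values, all_flags):
--     """Bucket abnormal findings by severity class; no comparison sort needed."""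
--     critical, warning, info = [], [], []
--     for test_name, data in all_values.items():
--         status = data.get("status", "normal")
--         if status == "normal":
--             continue
--         if status == "critical":
--             critical.append(_finding(test_name, data, status, "critical"))
--         elif status in ["elevated", "low"]:
--             warning.append(_finding(test_name, data, status, "warning"))
--         else:
--             info.append(_finding(test_name, data, status, "info"))
--     return (critical + warning + info)[:10]
-- ===== Notes on version B (the rewrite author's own statement) =====
-- stated objective: alternative
-- what changed: Replaces collect-then-stable-sort-by-severity-rank with a one-pass three-way bucket sort (critical/warning/info lists concatenated in rank order), eliminating the comparison sort while preserving the stable order.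
import Mathlib
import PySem

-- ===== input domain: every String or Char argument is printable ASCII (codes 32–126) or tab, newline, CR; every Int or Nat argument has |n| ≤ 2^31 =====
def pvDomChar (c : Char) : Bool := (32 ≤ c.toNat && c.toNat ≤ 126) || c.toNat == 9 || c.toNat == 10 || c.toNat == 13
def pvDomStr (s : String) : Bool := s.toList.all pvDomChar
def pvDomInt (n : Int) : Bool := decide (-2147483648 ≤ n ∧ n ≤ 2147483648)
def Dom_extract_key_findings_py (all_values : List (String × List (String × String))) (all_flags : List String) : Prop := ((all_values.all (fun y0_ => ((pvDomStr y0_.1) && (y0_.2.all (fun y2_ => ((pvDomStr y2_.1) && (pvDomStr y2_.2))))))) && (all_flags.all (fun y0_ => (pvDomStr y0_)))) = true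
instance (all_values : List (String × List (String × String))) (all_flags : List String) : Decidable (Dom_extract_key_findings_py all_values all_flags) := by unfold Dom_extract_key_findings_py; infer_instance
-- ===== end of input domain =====

-- B replaces A's collect-then-stable-sort by a one-pass three-way bucketing by severity; same return value.

-- shared helper: Python str.title(); hand-ported, exact on the printable-ASCII domain
def pyTitleGo : Bool → List Char → List Char
  | _, [] => []
  | prev, c :: rest =>
    if c.isAlpha then (if prev then c.toLower else c.toUpper) :: pyTitleGo true rest
    else c :: pyTitleGo false rest

def pyTitle (s : String) : String := String.mk (pyTitleGo false s.toList)

-- shared helper: the finding dict literal both Pythons build verbatim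
def pvFinding (test_name : String) (d : PySem.Dict String String) (status severity : String) : List (String × String) :=
  let display := pyTitle (PySem.Str.replace test_name "_" " ")
  let value := match d.get? "value" with | some v => v | none => "None"
  [("finding", display ++ ": " ++ value ++ " " ++ d.getD "unit" ""),
   ("severity", severity),
   ("detail", "Reference range: " ++ d.getD "reference_range" "?" ++ " — Status: " ++ status)]

-- ===== PORT A =====
def pvSev (f : List (String × String)) : String := (PySem.Dict.mk f).getD "severity" ""

def pvOrder : PySem.Dict String Int :=
  PySem.Dict.ofList [("critical", 0), ("warning", 1), ("info", 2)]

def pvKeyA (f : List (String × String)) : Int := pvOrder.getD (pvSev f) 3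

def stepA (findings : List (List (String × String))) (p : String × List (String × String)) :
    List (List (String × String)) :=
  let d := PySem.Dict.ofList p.2
  let status := d.getD "status" "normal"
  if status == "normal" then findings
  else
    let severity := if status == "critical" then "critical"
      else if status == "elevated" || status == "low" then "warning" else "info"
    findings ++ [pvFinding p.1 d status severity]

def extract_key_findings_py (all_values : List (String × List (String × String))) (all_flags : List String) : List (List (String × String)) :=
  let findings := ((PySem.Dict.ofList all_values).items).foldl stepA []
  PySem.List.slice (PySem.List.sorted findings pvKeyA) none (some 10)

-- ===== PORT B =====
def stepB (acc : List (List (String × String)) × List (List (String × String)) × List (List (String × String)))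
    (p : String × List (String × String)) :
    List (List (String × String)) × List (List (String × String)) × List (List (String × String)) :=
  let d := PySem.Dict.ofList p.2
  let status := d.getD "status" "normal"
  if status == "normal" then acc
  else if status == "critical" then (acc.1 ++ [pvFinding p.1 d status "critical"], acc.2.1, acc.2.2)
  else if status == "elevated" || status == "low" then (acc.1, acc.2.1 ++ [pvFinding p.1 d status "warning"], acc.2.2)
  else (acc.1, acc.2.1, acc.2.2 ++ [pvFinding p.1 d status "info"])

def extract_key_findings_py_alt (all_values : List (String × List (String × String))) (all_flags : List String) : List (List (String × String)) :=
  let acc := ((PySem.Dict.ofList all_values).items).foldl stepB ([], [], [])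
  (acc.1 ++ acc.2.1 ++ acc.2.2).take 10

-- ===== PRECONDITION & SPEC =====
def Spec_extract_key_findings_py (all_values : List (String × List (String × String))) (all_flags : List String) (out : List (List (String × String))) : Prop := out = extract_key_findings_py_alt all_values all_flags
instance (all_values : List (String × List (String × String))) (all_flags : List String) (out : List (List (String × String))) : Decidable (Spec_extract_key_findings_py all_values all_flags out) := by unfold Spec_extract_key_findings_py; infer_instance

-- ===== CLAIM (what is proved, stated in full; the proofs are below) =====
def Claim_equal_extract_key_findings_py : Prop := ∀ (all_values : List (String × List (String × String))) (all_flags : List String), Dom_extract_key_findings_py all_values all_flags → Spec_extract_key_findings_py all_values all_flags (extract_key_findings_py all_values all_flags)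

-- ===== LEMMAS AND PROOFS =====

theorem sev_pvFinding (tn : String) (d : PySem.Dict String String) (st sv : String) :
    pvSev (pvFinding tn d st sv) = sv := by
  simp [pvSev, pvFinding, PySem.Dict.getD, PySem.Dict.get?_mk_cons]

theorem insertBy_cons {α : Type} (before : α → α → Bool) (x a : α) (l : List α) :
    PySem.List.insertBy before x (a :: l) =
      if before x a then x :: a :: l else a :: PySem.List.insertBy before x l := rfl

theorem insertBy_skip {α : Type} (before : α → α → Bool) (x : α) (A R : List α)
    (h : ∀ y ∈ A, before x y = false) :
    PySem.List.insertBy before x (A ++ R) = A ++ PySem.List.insertBy before x R := by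
  induction A with
  | nil => simp
  | cons a A ih =>
    have ha : before x a = false := h a (by simp)
    rw [List.cons_append, insertBy_cons, if_neg (by simp [ha]), ih (fun y hy => h y (by simp [hy]))]
    simp

theorem insertBy_front {α : Type} (before : α → α → Bool) (x : α) (zs : List α)
    (h : ∀ y ∈ zs, before x y = true) :
    PySem.List.insertBy before x zs = x :: zs := by
  cases zs with
  | nil => rfl
  | cons z t => rw [insertBy_cons, if_pos (by simp [h z (by simp)])]

theorem sorted_three {α : Type} (key : α → Int) (fs : List α)
    (h : ∀ f ∈ fs, key f = 0 ∨ key f = 1 ∨ key f = 2) :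
    PySem.List.sorted fs key =
      fs.filter (fun f => key f == 0) ++ fs.filter (fun f => key f == 1) ++ fs.filter (fun f => key f == 2) := by
  induction fs using List.reverseRecOn with
  | nil => simp [PySem.List.sorted_eq_foldl_insertBy]
  | append_singleton xs x ih =>
    have hxs : ∀ f ∈ xs, key f = 0 ∨ key f = 1 ∨ key f = 2 :=
      fun f hf => h f (by simp [hf])
    have hstep : PySem.List.sorted (xs ++ [x]) key =
        PySem.List.insertBy (fun a b => decide (key a < key b)) x (PySem.List.sorted xs key) := by
      rw [PySem.List.sorted_eq_foldl_insertBy, PySem.List.sorted_eq_foldl_insertBy, List.foldl_append]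
      rfl
    rw [hstep, ih hxs]
    have mem0 : ∀ y ∈ xs.filter (fun f => key f == 0), key y = 0 := by
      intro y hy; have := List.of_mem_filter hy; simpa using this
    have mem1 : ∀ y ∈ xs.filter (fun f => key f == 1), key y = 1 := by
      intro y hy; have := List.of_mem_filter hy; simpa using this
    have mem2 : ∀ y ∈ xs.filter (fun f => key f == 2), key y = 2 := by
      intro y hy; have := List.of_mem_filter hy; simpa using this
    rcases h x (by simp) with hx | hx | hx
    · rw [List.append_assoc,
        insertBy_skip _ _ _ _ (fun y hy => by simp [mem0 y hy, hx]),
        insertBy_front _ _ _ (by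
          intro y hy
          rcases List.mem_append.1 hy with hy | hy
          · simp [mem1 y hy, hx]
          · simp [mem2 y hy, hx])]
      simp [List.filter_append, hx, List.append_assoc]
    · rw [insertBy_skip _ _ _ _ (by
          intro y hy
          rcases List.mem_append.1 hy with hy | hy
          · simp [mem0 y hy, hx]
          · simp [mem1 y hy, hx]),
        insertBy_front _ _ _ (fun y hy => by simp [mem2 y hy, hx])]
      simp [List.filter_append, hx, List.append_assoc]
    · rw [PySem.List.insertBy_of_forall_not_before _ _ _ (by
          intro y hy
          rcases List.mem_append.1 hy with hy | hy
          · rcases List.mem_append.1 hy with hy | hy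
            · simp [mem0 y hy, hx]
            · simp [mem1 y hy, hx]
          · simp [mem2 y hy, hx])]
      simp [List.filter_append, hx, List.append_assoc]

def Pok (fs : List (List (String × String))) : Prop :=
  ∀ f ∈ fs, pvSev f = "critical" ∨ pvSev f = "warning" ∨ pvSev f = "info"

theorem fold_inv (l : List (String × List (String × String))) :
    ∀ fs : List (List (String × String)), Pok fs →
      l.foldl stepB (fs.filter (fun f => pvSev f == "critical"),
                     fs.filter (fun f => pvSev f == "warning"),
                     fs.filter (fun f => pvSev f == "info"))
        = ((l.foldl stepA fs).filter (fun f => pvSev f == "critical"),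
           (l.foldl stepA fs).filter (fun f => pvSev f == "warning"),
           (l.foldl stepA fs).filter (fun f => pvSev f == "info"))
      ∧ Pok (l.foldl stepA fs) := by
  induction l with
  | nil => exact fun fs hfs => ⟨rfl, hfs⟩
  | cons p l ih =>
    intro fs hfs
    simp only [List.foldl_cons]
    by_cases hn : (PySem.Dict.ofList p.2).getD "status" "normal" == "normal"
    · have hA : stepA fs p = fs := by simp [stepA, hn]
      have hB : ∀ acc, stepB acc p = acc := by intro acc; simp [stepB, hn]
      rw [hA, hB]
      exact ih fs hfs
    · set st := (PySem.Dict.ofList p.2).getD "status" "normal" with hst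
      have hPok : ∀ sv, sv = "critical" ∨ sv = "warning" ∨ sv = "info" →
          Pok (fs ++ [pvFinding p.1 (PySem.Dict.ofList p.2) st sv]) := by
        intro sv hsv f hf
        rcases List.mem_append.1 hf with hf | hf
        · exact hfs f hf
        · simp only [List.mem_singleton] at hf
          subst hf; rw [sev_pvFinding]; exact hsv
      by_cases hc : st == "critical"
      · have hc' : st = "critical" := by simpa using hc
        have hA : stepA fs p = fs ++ [pvFinding p.1 (PySem.Dict.ofList p.2) st "critical"] := by
          simp [stepA, hn, ← hst, hc']
        have hB : stepB (fs.filter (fun f => pvSev f == "critical"),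
                         fs.filter (fun f => pvSev f == "warning"),
                         fs.filter (fun f => pvSev f == "info")) p
            = ((fs ++ [pvFinding p.1 (PySem.Dict.ofList p.2) st "critical"]).filter (fun f => pvSev f == "critical"),
               (fs ++ [pvFinding p.1 (PySem.Dict.ofList p.2) st "critical"]).filter (fun f => pvSev f == "warning"),
               (fs ++ [pvFinding p.1 (PySem.Dict.ofList p.2) st "critical"]).filter (fun f => pvSev f == "info")) := by
          simp [stepB, hn, ← hst, hc', List.filter_append, sev_pvFinding]
        rw [hA, hB]
        exact ih _ (hPok "critical" (Or.inl rfl))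
      · by_cases he : st == "elevated" || st == "low"
        · have hA : stepA fs p = fs ++ [pvFinding p.1 (PySem.Dict.ofList p.2) st "warning"] := by
            simp [stepA, hn, ← hst, hc, he]
          have hB : stepB (fs.filter (fun f => pvSev f == "critical"),
                           fs.filter (fun f => pvSev f == "warning"),
                           fs.filter (fun f => pvSev f == "info")) p
              = ((fs ++ [pvFinding p.1 (PySem.Dict.ofList p.2) st "warning"]).filter (fun f => pvSev f == "critical"),
                 (fs ++ [pvFinding p.1 (PySem.Dict.ofList p.2) st "warning"]).filter (fun f => pvSev f == "warning"),
                 (fs ++ [pvFinding p.1 (PySem.Dict.ofList p.2) st "warning"]).filter (fun f => pvSev f == "info")) := by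
            simp [stepB, hn, ← hst, hc, he, List.filter_append, sev_pvFinding]
          rw [hA, hB]
          exact ih _ (hPok "warning" (Or.inr (Or.inl rfl)))
        · have hA : stepA fs p = fs ++ [pvFinding p.1 (PySem.Dict.ofList p.2) st "info"] := by
            simp [stepA, hn, ← hst, hc, he]
          have hB : stepB (fs.filter (fun f => pvSev f == "critical"),
                           fs.filter (fun f => pvSev f == "warning"),
                           fs.filter (fun f => pvSev f == "info")) p
              = ((fs ++ [pvFinding p.1 (PySem.Dict.ofList p.2) st "info"]).filter (fun f => pvSev f == "critical"),
                 (fs ++ [pvFinding p.1 (PySem.Dict.ofList p.2) st "info"]).filter (fun f => pvSev f == "warning"),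
                 (fs ++ [pvFinding p.1 (PySem.Dict.ofList p.2) st "info"]).filter (fun f => pvSev f == "info")) := by
            simp [stepB, hn, ← hst, hc, he, List.filter_append, sev_pvFinding]
          rw [hA, hB]
          exact ih _ (hPok "info" (Or.inr (Or.inr rfl)))

-- ===== VERDICT (by name: the statement is the Claim_ definition above) =====
theorem extract_key_findings_py_spec : Claim_equal_extract_key_findings_py := by
  intro all_values all_flags _
  unfold Spec_extract_key_findings_py extract_key_findings_py extract_key_findings_py_alt
  dsimp only
  obtain ⟨hB, hPok⟩ := fold_inv ((PySem.Dict.ofList all_values).items) [] (by intro f hf; simp at hf)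
  simp only [List.filter_nil] at hB
  rw [hB]
  set F := ((PySem.Dict.ofList all_values).items).foldl stepA [] with hF
  have hkey : ∀ f ∈ F, pvKeyA f = 0 ∨ pvKeyA f = 1 ∨ pvKeyA f = 2 := by
    intro f hf
    rcases hPok f hf with h | h | h <;> · simp only [pvKeyA, h]; decide
  rw [sorted_three pvKeyA F hkey]
  have e0 : F.filter (fun f => pvKeyA f == 0) = F.filter (fun f => pvSev f == "critical") := by
    apply List.filter_congr
    intro f hf
    rcases hPok f hf with h | h | h <;> · simp only [pvKeyA, h]; decide
  have e1 : F.filter (fun f => pvKeyA f == 1) = F.filter (fun f => pvSev f == "warning") := by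
    apply List.filter_congr
    intro f hf
    rcases hPok f hf with h | h | h <;> · simp only [pvKeyA, h]; decide
  have e2 : F.filter (fun f => pvKeyA f == 2) = F.filter (fun f => pvSev f == "info") := by
    apply List.filter_congr
    intro f hf
    rcases hPok f hf with h | h | h <;> · simp only [pvKeyA, h]; decide
  rw [e0, e1, e2]
  rw [PySem.List.slice_to]
  · rfl
  · norm_num
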